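-- pv_equiv track=rewrite | github.com/afifnasrullahs/Prediction_quality_water | streamlit_app.py | parse_recommendation_text
-- ===== SOURCE A (Python) =====
-- from typing import Dict, List
--
-- def parse_recommendation_text(text: str) -> Dict[str, str]:
--     interpretation = ""
--     recommendation = ""
--     lines = text.splitlines()
--
--     def _next_non_empty(start_idx: int) -> str:
--         for idx in range(start_idx, len(lines)):
--             candidate = lines[idx].strip()
--             if candidate:
--                 return candidate
--         return ""
--
--     for idx, line in enumerate(lines):
--         stripped = line.strip()
--         lower = stripped.lower()
--         if lower.startswith("interpretasi:"):
--             value = stripped.split(":", 1)[1].strip()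
--             if not value:
--                 value = _next_non_empty(idx + 1)
--             interpretation = value
--         elif lower.startswith("rekomendasi:"):
--             value = stripped.split(":", 1)[1].strip()
--             if not value:
--                 value = _next_non_empty(idx + 1)
--             recommendation = value
--
--     return {
--         "interpretasi": interpretation,
--         "rekomendasi": recommendation,
--         "raw": text,
--     }
-- ===== SOURCE B (Python) =====
-- def parse_recommendation_text(text: str) -> dict:
--     lines = [l.strip() for l in text.splitlines()]
--
--     def field(prefix: str) -> str:
--         # only the last header occurrence matters: scan backwards for it
--         for i in range(len(lines) - 1, -1, -1):
--             if lines[i].lower().startswith(prefix):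
--                 value = lines[i].split(":", 1)[1].strip()
--                 if value:
--                     return value
--                 return next((c for c in lines[i + 1:] if c), "")
--         return ""
--
--     return {
--         "interpretasi": field("interpretasi:"),
--         "rekomendasi": field("rekomendasi:"),
--         "raw": text,
--     }
-- ===== Notes on version B (the rewrite author's own statement) =====
-- stated objective: alternative
-- what changed: Instead of A's forward loop that overwrites each field at every header and re-scans the tail via _next_non_empty, B strips the lines once and resolves each field independently by a reverse search for the LAST header occurrence, taking its inline value or the first following non-empty line.
import Mathlib
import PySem

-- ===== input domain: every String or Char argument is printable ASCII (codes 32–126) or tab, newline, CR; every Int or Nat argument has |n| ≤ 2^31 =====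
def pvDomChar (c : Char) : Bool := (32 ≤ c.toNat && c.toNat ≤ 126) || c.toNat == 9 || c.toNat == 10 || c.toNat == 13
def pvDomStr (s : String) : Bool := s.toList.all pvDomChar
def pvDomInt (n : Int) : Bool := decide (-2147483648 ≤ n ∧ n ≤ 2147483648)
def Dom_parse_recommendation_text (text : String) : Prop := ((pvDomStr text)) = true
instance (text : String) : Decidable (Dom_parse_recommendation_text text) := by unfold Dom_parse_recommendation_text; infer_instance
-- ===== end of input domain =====

-- B replaces A's forward loop with nested look-ahead by two independent reverse searches
-- for the LAST header occurrence (A overwrites the field at each header, so only the last matters).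

-- ===== PORT A =====

-- A's inner helper `_next_non_empty(start_idx)`: it scans lines[start_idx:]; ported as a scan of that suffix.
def pvNextNonEmpty (ls : List String) : String :=
  match ls with
  | [] => ""
  | l :: rest =>
    let c := PySem.Str.strip l
    if c ≠ "" then c else pvNextNonEmpty rest

-- the `for idx, line in enumerate(lines)` loop; the tail `rest` is lines[idx+1:].
-- `stripped.split(":", 1)[1]`: index 1 always exists here since the header check guarantees a ':' ;
-- the `.getD ""` defaults are therefore never taken.
def pvLoopA (ls : List String) (i r : String) : String × String :=
  match ls with
  | [] => (i, r)
  | l :: rest =>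
    let stripped := PySem.Str.strip l
    let lower := PySem.Str.lower stripped
    if PySem.Str.startswith lower "interpretasi:" then
      let v0 := PySem.Str.strip ((PySem.List.pyGet? ((PySem.Str.splitMax? stripped ":" 1).getD []) 1).getD "")
      let v := if v0 = "" then pvNextNonEmpty rest else v0
      pvLoopA rest v r
    else if PySem.Str.startswith lower "rekomendasi:" then
      let v0 := PySem.Str.strip ((PySem.List.pyGet? ((PySem.Str.splitMax? stripped ":" 1).getD []) 1).getD "")
      let v := if v0 = "" then pvNextNonEmpty rest else v0
      pvLoopA rest i v
    else pvLoopA rest i r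

def parse_recommendation_text (text : String) : List (String × String) :=
  let p := pvLoopA (PySem.Str.splitlines text) "" ""
  [("interpretasi", p.1), ("rekomendasi", p.2), ("raw", text)]

-- ===== PORT B =====

-- `next((c for c in lines[i+1:] if c), "")` over the already-stripped lines
def pvFirstNonEmpty (ls : List String) : String :=
  match ls with
  | [] => ""
  | c :: rest => if c ≠ "" then c else pvFirstNonEmpty rest

-- B's `field(prefix)`: the reverse `for i in range(len(lines)-1, -1, -1)` loop, which returns at
-- the LAST header occurrence, is ported as a recursion that prefers a match found in the tail;
-- none = the loop fell through (B then returns "").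
def pvField? (ls : List String) (pre : String) : Option String :=
  match ls with
  | [] => none
  | l :: rest =>
    match pvField? rest pre with
    | some v => some v
    | none =>
      if PySem.Str.startswith (PySem.Str.lower l) pre then
        let v := PySem.Str.strip ((PySem.List.pyGet? ((PySem.Str.splitMax? l ":" 1).getD []) 1).getD "")
        some (if v = "" then pvFirstNonEmpty rest else v)
      else none

def parse_recommendation_text_alt (text : String) : List (String × String) :=
  let ls := (PySem.Str.splitlines text).map PySem.Str.strip
  [("interpretasi", (pvField? ls "interpretasi:").getD ""),
   ("rekomendasi", (pvField? ls "rekomendasi:").getD ""),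
   ("raw", text)]

-- ===== PRECONDITION & SPEC =====
def Spec_parse_recommendation_text (text : String) (out : List (String × String)) : Prop := out = parse_recommendation_text_alt text
instance (text : String) (out : List (String × String)) : Decidable (Spec_parse_recommendation_text text out) := by unfold Spec_parse_recommendation_text; infer_instance

-- ===== CLAIM (what is proved, stated in full; the proofs are below) =====
def Claim_equal_parse_recommendation_text : Prop := ∀ (text : String), Dom_parse_recommendation_text text → Spec_parse_recommendation_text text (parse_recommendation_text text)

-- ===== LEMMAS AND PROOFS =====

-- the `split(":",1)[1].strip()` value both programs compute on a (stripped) line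
def pvVal (s : String) : String :=
  PySem.Str.strip ((PySem.List.pyGet? ((PySem.Str.splitMax? s ":" 1).getD []) 1).getD "")

-- B's first-non-empty over stripped lines = A's _next_non_empty over raw lines
theorem pv_fne (ls : List String) : pvFirstNonEmpty (ls.map PySem.Str.strip) = pvNextNonEmpty ls := by
  induction ls with
  | nil => rfl
  | cons l rest ih => simp only [List.map, pvFirstNonEmpty, pvNextNonEmpty, ih]

-- a string cannot start with both headers (their first characters differ)
theorem pv_not_both (s : String) (h : PySem.Str.startswith s "interpretasi:" = true) :
    PySem.Str.startswith s "rekomendasi:" = false := by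
  by_contra hc
  rw [Bool.not_eq_false, PySem.Str.startswith_eq, PySem.Chars.startswith_iff] at hc
  rw [PySem.Str.startswith_eq, PySem.Chars.startswith_iff] at h
  obtain ⟨t1, h1⟩ := h
  obtain ⟨t2, h2⟩ := hc
  rw [← h1] at h2
  simp at h2

-- one step of A's loop, per branch
theorem pvA_cons_i (l : String) (rest : List String) (i r : String)
    (h : PySem.Str.startswith (PySem.Str.lower (PySem.Str.strip l)) "interpretasi:" = true) :
    pvLoopA (l :: rest) i r =
      pvLoopA rest (if pvVal (PySem.Str.strip l) = "" then pvNextNonEmpty rest else pvVal (PySem.Str.strip l)) r := by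
  simp only [pvLoopA, pvVal, h, reduceIte]

theorem pvA_cons_r (l : String) (rest : List String) (i r : String)
    (h1 : PySem.Str.startswith (PySem.Str.lower (PySem.Str.strip l)) "interpretasi:" = false)
    (h2 : PySem.Str.startswith (PySem.Str.lower (PySem.Str.strip l)) "rekomendasi:" = true) :
    pvLoopA (l :: rest) i r =
      pvLoopA rest i (if pvVal (PySem.Str.strip l) = "" then pvNextNonEmpty rest else pvVal (PySem.Str.strip l)) := by
  simp only [pvLoopA, pvVal, h1, h2, reduceIte, Bool.false_eq_true, if_false]

theorem pvA_cons_none (l : String) (rest : List String) (i r : String)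
    (h1 : PySem.Str.startswith (PySem.Str.lower (PySem.Str.strip l)) "interpretasi:" = false)
    (h2 : PySem.Str.startswith (PySem.Str.lower (PySem.Str.strip l)) "rekomendasi:" = false) :
    pvLoopA (l :: rest) i r = pvLoopA rest i r := by
  simp only [pvLoopA, h1, h2, Bool.false_eq_true, if_false]

-- one step of B's reverse search, per branch
theorem pvF_cons_pos (l : String) (rest : List String) (pre : String)
    (h : PySem.Str.startswith (PySem.Str.lower l) pre = true) :
    pvField? (l :: rest) pre =
      some ((pvField? rest pre).getD (if pvVal l = "" then pvFirstNonEmpty rest else pvVal l)) := by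
  cases hF : pvField? rest pre <;> simp only [pvField?, pvVal, h, hF, reduceIte, Option.getD_some, Option.getD_none]

theorem pvF_cons_neg (l : String) (rest : List String) (pre : String)
    (h : PySem.Str.startswith (PySem.Str.lower l) pre = false) :
    pvField? (l :: rest) pre = pvField? rest pre := by
  cases hF : pvField? rest pre <;> simp only [pvField?, h, hF, Bool.false_eq_true, if_false]

-- the invariant: A's forward fold = B's two reverse searches (with A's accumulators as defaults)
theorem pv_key (ls : List String) (i r : String) :
    pvLoopA ls i r =
      ((pvField? (ls.map PySem.Str.strip) "interpretasi:").getD i,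
       (pvField? (ls.map PySem.Str.strip) "rekomendasi:").getD r) := by
  induction ls generalizing i r with
  | nil => rfl
  | cons l rest ih =>
    simp only [List.map]
    cases h1 : PySem.Str.startswith (PySem.Str.lower (PySem.Str.strip l)) "interpretasi:"
    · cases h2 : PySem.Str.startswith (PySem.Str.lower (PySem.Str.strip l)) "rekomendasi:"
      · rw [pvA_cons_none l rest i r h1 h2, ih, pvF_cons_neg _ _ _ h1, pvF_cons_neg _ _ _ h2]
      · rw [pvA_cons_r l rest i r h1 h2, ih, pvF_cons_neg _ _ _ h1, pvF_cons_pos _ _ _ h2]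
        simp [pv_fne]
    · have hr := pv_not_both _ h1
      rw [pvA_cons_i l rest i r h1, ih, pvF_cons_pos _ _ _ h1, pvF_cons_neg _ _ _ hr]
      simp [pv_fne]

-- ===== VERDICT (by name: the statement is the Claim_ definition above) =====
theorem parse_recommendation_text_spec : Claim_equal_parse_recommendation_text := by
  intro text _
  unfold Spec_parse_recommendation_text parse_recommendation_text parse_recommendation_text_alt
  rw [pv_key]
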